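-- pv_equiv track=rewrite | github.com/luizmont5/Exerc-cios-Computabilidade-e-Complexidade-de-algoritmo | 20 questão/exercicio20.py | afd_exatamente_um_ab
-- ===== SOURCE A (Python) =====
-- def afd_exatamente_um_ab(entrada):
--     estado_atual = 'q0'
--     ab_encontrado = False
--
--     for simbolo in entrada:
--         if estado_atual == 'q0':
--             if simbolo == 'a':
--                 estado_atual = 'q1'
--         elif estado_atual == 'q1':
--             if simbolo == 'b':
--                 if ab_encontrado:
--                     return False
--                 ab_encontrado = True
--                 estado_atual = 'q0'
--             elif simbolo == 'a':
--                 estado_atual = 'q1'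
--
--     return ab_encontrado
-- ===== SOURCE B (Python) =====
-- def afd_exatamente_um_ab(entrada):
--     it = iter(entrada)
--     count = 0
--     while True:
--         if not any(c == 'a' for c in it):
--             break
--         if not any(c == 'b' for c in it):
--             break
--         count += 1
--         if count > 1:
--             return False
--     return count == 1
-- ===== Notes on version B (the rewrite author's own statement) =====
-- stated objective: idiomatic
-- what changed: Replaced the explicit DFA state machine (state strings + flag updated per character) by a phase-based consumer: repeatedly consume the shared iterator up to the next 'a' and then up to the next 'b' with any(), counting completed occurrences and failing on the second.
import Mathlib
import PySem

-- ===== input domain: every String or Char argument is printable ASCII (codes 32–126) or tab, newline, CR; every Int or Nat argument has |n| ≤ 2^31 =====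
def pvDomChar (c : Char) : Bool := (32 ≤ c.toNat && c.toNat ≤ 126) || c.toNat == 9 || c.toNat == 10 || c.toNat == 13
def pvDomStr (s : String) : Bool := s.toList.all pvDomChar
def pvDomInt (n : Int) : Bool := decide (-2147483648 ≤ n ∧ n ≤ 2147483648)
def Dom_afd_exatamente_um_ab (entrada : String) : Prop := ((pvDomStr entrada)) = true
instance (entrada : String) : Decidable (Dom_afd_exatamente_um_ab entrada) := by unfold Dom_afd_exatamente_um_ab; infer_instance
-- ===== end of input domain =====

-- B replaces A's per-character DFA (state strings + flag) by a phase-based consumer that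
-- repeatedly eats the iterator up to the next 'a' and then the next 'b'; same results, idiomatic.

-- ===== PORT A =====
-- A: explicit DFA with state strings 'q0'/'q1' and an ab_encontrado flag; early return False
-- at the second completed 'ab'. The for-loop with early return becomes structural recursion
-- over the characters carrying (estado, ab).
def afdLoopA : List Char → String → Bool → Bool
  | [], _, ab => ab
  | c :: cs, estado, ab =>
    if estado == "q0" then
      if c == 'a' then afdLoopA cs "q1" ab else afdLoopA cs estado ab
    else if estado == "q1" then
      if c == 'b' then
        if ab then false else afdLoopA cs "q0" true
      else if c == 'a' then afdLoopA cs "q1" ab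
      else afdLoopA cs estado ab
    else afdLoopA cs estado ab

def afd_exatamente_um_ab (entrada : String) : Bool :=
  afdLoopA entrada.toList "q0" false

-- ===== PORT B =====
-- B: phase-based: consume up to and past the next 'a', then up to and past the next 'b'
-- (Python: any(c == x for c in it) on a shared iterator); count completed occurrences.
-- consumePast l x = rest of the iterator after the first x (none if any() exhausted it).
def consumePast : List Char → Char → Option (List Char)
  | [], _ => none
  | c :: cs, x => if c == x then some cs else consumePast cs x

theorem consumePast_length : ∀ (l : List Char) (x : Char) (r : List Char),
    consumePast l x = some r → r.length < l.length := by
  intro l x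
  induction l with
  | nil => intro r h; simp [consumePast] at h
  | cons c cs ih =>
    intro r h
    simp only [consumePast] at h
    by_cases hc : c == x
    · simp [hc] at h; simp [← h]
    · simp [hc] at h
      exact Nat.lt_trans (ih r h) (Nat.lt_succ_self _)

def afdLoopB (l : List Char) (count : Nat) : Bool :=
  match ha : consumePast l 'a' with
  | none => count == 1
  | some r1 =>
    match hb : consumePast r1 'b' with
    | none => count == 1
    | some r2 =>
      if count + 1 > 1 then false else afdLoopB r2 (count + 1)
termination_by l.length
decreasing_by
  exact Nat.lt_trans (consumePast_length r1 'b' r2 hb) (consumePast_length l 'a' r1 ha)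

def afd_exatamente_um_ab_alt (entrada : String) : Bool :=
  afdLoopB entrada.toList 0

-- ===== PRECONDITION & SPEC =====
def Spec_afd_exatamente_um_ab (entrada : String) (out : Bool) : Prop := out = afd_exatamente_um_ab_alt entrada
instance (entrada : String) (out : Bool) : Decidable (Spec_afd_exatamente_um_ab entrada out) := by unfold Spec_afd_exatamente_um_ab; infer_instance

-- ===== CLAIM (what is proved, stated in full; the proofs are below) =====
def Claim_equal_afd_exatamente_um_ab : Prop := ∀ (entrada : String), Dom_afd_exatamente_um_ab entrada → Spec_afd_exatamente_um_ab entrada (afd_exatamente_um_ab entrada)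

-- ===== LEMMAS AND PROOFS =====

-- unfolding equation for afdLoopB as a plain (non-dependent) match
theorem afdLoopB_eq (l : List Char) (count : Nat) :
    afdLoopB l count =
      match consumePast l 'a' with
      | none => count == 1
      | some r1 =>
        match consumePast r1 'b' with
        | none => count == 1
        | some r2 => if count + 1 > 1 then false else afdLoopB r2 (count + 1) := by
  rw [afdLoopB]
  cases consumePast l 'a' with
  | none => rfl
  | some r1 =>
    dsimp only
    cases consumePast r1 'b' <;> rfl

-- A in state q0 skips to just past the first 'a' (or finishes with the flag).
theorem afdLoopA_q0 (l : List Char) (ab : Bool) :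
    afdLoopA l "q0" ab =
      match consumePast l 'a' with
      | none => ab
      | some r => afdLoopA r "q1" ab := by
  induction l with
  | nil => simp [afdLoopA, consumePast]
  | cons c cs ih =>
    by_cases hc : c = 'a'
    · subst hc; simp [afdLoopA, consumePast]
    · simp [afdLoopA, consumePast, hc, ih]

-- A in state q1 skips to just past the first 'b' (staying in q1 on every other symbol).
theorem afdLoopA_q1 (l : List Char) (ab : Bool) :
    afdLoopA l "q1" ab =
      match consumePast l 'b' with
      | none => ab
      | some r => if ab then false else afdLoopA r "q0" true := by
  induction l with
  | nil => simp [afdLoopA, consumePast]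
  | cons c cs ih =>
    by_cases hb : c = 'b'
    · subst hb; simp [afdLoopA, consumePast]
    · by_cases ha2 : c = 'a'
      · subst ha2; simp [afdLoopA, consumePast, ih]
      · simp [afdLoopA, consumePast, hb, ha2, ih]

theorem afdLoop_agree : ∀ (n : ℕ) (l : List Char) (ab : Bool), l.length ≤ n →
    afdLoopA l "q0" ab = afdLoopB l (if ab then 1 else 0) := by
  intro n
  induction n with
  | zero =>
    intro l ab hn
    have hl : l = [] := List.eq_nil_of_length_eq_zero (Nat.le_zero.mp hn)
    subst hl
    cases ab <;> simp [afdLoopA, afdLoopB, consumePast]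
  | succ n ih =>
    intro l ab hn
    rw [afdLoopA_q0, afdLoopB_eq]
    cases ha : consumePast l 'a' with
    | none => cases ab <;> simp
    | some r1 =>
      dsimp only
      rw [afdLoopA_q1]
      cases hb : consumePast r1 'b' with
      | none => cases ab <;> simp
      | some r2 =>
        dsimp only
        cases ab with
        | true => simp
        | false =>
          have h2 : r2.length ≤ n := by
            have := Nat.lt_trans (consumePast_length r1 'b' r2 hb)
              (consumePast_length l 'a' r1 ha)
            omega
          simpa using ih r2 true h2

-- ===== VERDICT (by name: the statement is the Claim_ definition above) =====
theorem afd_exatamente_um_ab_spec : Claim_equal_afd_exatamente_um_ab := by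
  intro entrada _
  unfold Spec_afd_exatamente_um_ab afd_exatamente_um_ab afd_exatamente_um_ab_alt
  simpa using afdLoop_agree entrada.toList.length entrada.toList false (Nat.le_refl _)
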